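-- pv_equiv track=rewrite | github.com/The-Sage-Mage-LLC/image-processing-app | src/models/color_analyzer.py | _get_color_harmony_type
-- ===== SOURCE A (Python) =====
-- def _get_color_harmony_type(hue: int) -> str:
--     """Determine color harmony type based on hue."""
--     hue_ranges = [
--         (0, 30, "Warm (Red-Orange)"),
--         (30, 60, "Warm (Yellow-Orange)"),
--         (60, 90, "Neutral-Warm (Yellow)"),
--         (90, 150, "Cool (Green)"),
--         (150, 210, "Cool (Cyan)"),
--         (210, 270, "Cool (Blue)"),
--         (270, 330, "Neutral-Cool (Purple)"),
--         (330, 360, "Warm (Red)")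
--     ]
--
--     for start, end, harmony_type in hue_ranges:
--         if start <= hue < end:
--             return harmony_type
--
--     return "Unknown"
-- ===== SOURCE B (Python) =====
-- _BOUNDS = [0, 30, 60, 90, 150, 210, 270, 330, 360]
-- _LABELS = [
--     "Warm (Red-Orange)",
--     "Warm (Yellow-Orange)",
--     "Neutral-Warm (Yellow)",
--     "Cool (Green)",
--     "Cool (Cyan)",
--     "Cool (Blue)",
--     "Neutral-Cool (Purple)",
--     "Warm (Red)",
-- ]
--
--
-- def _get_color_harmony_type(hue: int) -> str:
--     """Determine color harmony type based on hue (binary search in a boundary table)."""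
--     if hue < 0 or hue >= 360:
--         return "Unknown"
--     lo, hi = 0, len(_BOUNDS)
--     while lo < hi:  # bisect_right over _BOUNDS
--         mid = (lo + hi) // 2
--         if _BOUNDS[mid] <= hue:
--             lo = mid + 1
--         else:
--             hi = mid
--     return _LABELS[lo - 1]
-- ===== Notes on version B (the rewrite author's own statement) =====
-- stated objective: alternative
-- what changed: Replaced the linear scan over (start,end,label) triples with a range guard plus a hand-rolled bisect_right binary search over a sorted boundary array with a parallel label list.
import Mathlib
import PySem

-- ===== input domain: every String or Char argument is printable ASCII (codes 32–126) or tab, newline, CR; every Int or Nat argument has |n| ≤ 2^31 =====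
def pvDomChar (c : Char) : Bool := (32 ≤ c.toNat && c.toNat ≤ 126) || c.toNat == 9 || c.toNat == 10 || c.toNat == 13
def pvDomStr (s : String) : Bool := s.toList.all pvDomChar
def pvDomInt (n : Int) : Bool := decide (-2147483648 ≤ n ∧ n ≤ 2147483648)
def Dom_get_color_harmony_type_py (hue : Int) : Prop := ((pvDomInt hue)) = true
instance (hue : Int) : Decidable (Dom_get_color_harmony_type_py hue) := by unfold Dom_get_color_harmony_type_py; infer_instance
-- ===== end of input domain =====

-- B replaces A's linear scan over range triples by a range guard plus a binary search over a boundary table (alternative decomposition, same behaviour).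

-- ===== PORT A =====
-- first matching (start, end, label) triple, "Unknown" if none
def pvScanRanges (hue : Int) : List (Int × Int × String) → String
  | [] => "Unknown"
  | (s, e, t) :: rest => if s ≤ hue ∧ hue < e then t else pvScanRanges hue rest

def get_color_harmony_type_py (hue : Int) : String :=
  pvScanRanges hue
    [(0, 30, "Warm (Red-Orange)"),
     (30, 60, "Warm (Yellow-Orange)"),
     (60, 90, "Neutral-Warm (Yellow)"),
     (90, 150, "Cool (Green)"),
     (150, 210, "Cool (Cyan)"),
     (210, 270, "Cool (Blue)"),
     (270, 330, "Neutral-Cool (Purple)"),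
     (330, 360, "Warm (Red)")]

-- ===== PORT B =====
def pvBounds : List Int := [0, 30, 60, 90, 150, 210, 270, 330, 360]
def pvLabels : List String :=
  ["Warm (Red-Orange)", "Warm (Yellow-Orange)", "Neutral-Warm (Yellow)", "Cool (Green)",
   "Cool (Cyan)", "Cool (Blue)", "Neutral-Cool (Purple)", "Warm (Red)"]

-- the while-loop of Source B (bisect_right over pvBounds); fuel ≥ hi - lo only makes the loop structural
def pvBisect (hue : Int) : Nat → Nat → Nat → Nat
  | 0, lo, _ => lo
  | fuel + 1, lo, hi =>
    if lo < hi then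
      let mid := (lo + hi) / 2
      if pvBounds.getD mid 0 ≤ hue then pvBisect hue fuel (mid + 1) hi
      else pvBisect hue fuel lo mid
    else lo

def get_color_harmony_type_py_alt (hue : Int) : String :=
  if hue < 0 ∨ 360 ≤ hue then "Unknown"
  else pvLabels.getD (pvBisect hue pvBounds.length 0 pvBounds.length - 1) ""

-- ===== PRECONDITION & SPEC =====
def Spec_get_color_harmony_type_py (hue : Int) (out : String) : Prop := out = get_color_harmony_type_py_alt hue
instance (hue : Int) (out : String) : Decidable (Spec_get_color_harmony_type_py hue out) := by unfold Spec_get_color_harmony_type_py; infer_instance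

-- ===== CLAIM (what is proved, stated in full; the proofs are below) =====
def Claim_equal_get_color_harmony_type_py : Prop := ∀ (hue : Int), Dom_get_color_harmony_type_py hue → Spec_get_color_harmony_type_py hue (get_color_harmony_type_py hue)

-- ===== LEMMAS AND PROOFS =====

-- outside [0, 360) A's scan matches no range
theorem pvA_unknown (hue : Int) (h : hue < 0 ∨ 360 ≤ hue) :
    get_color_harmony_type_py hue = "Unknown" := by
  simp only [get_color_harmony_type_py, pvScanRanges]
  split_ifs <;> first | rfl | omega

-- ===== VERDICT (by name: the statement is the Claim_ definition above) =====
theorem get_color_harmony_type_py_spec : Claim_equal_get_color_harmony_type_py := by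
  intro hue _
  unfold Spec_get_color_harmony_type_py
  by_cases hout : hue < 0 ∨ 360 ≤ hue
  · rw [pvA_unknown hue hout, get_color_harmony_type_py_alt, if_pos hout]
  · have h0 : 0 ≤ hue := by omega
    have h1 : hue < 360 := by omega
    interval_cases hue <;> decide
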